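-- pv_equiv track=rewrite | github.com/rotblauer/wall_tart | cellular_automata_poster.py | generate_automaton
-- ===== SOURCE A (Python) =====
-- def apply_rule(rule_number, left, center, right):
--     """Apply an elementary cellular automaton rule to a three-cell neighbourhood.
--
--     The three cells form a 3-bit index (left as the most significant bit).
--     The corresponding bit of *rule_number* gives the new cell value.
--
--     Parameters
--     ----------
--     rule_number : int
--         Rule number (0–255).
--     left, center, right : int
--         Current states (0 or 1) of the left, centre, and right neighbours.
--
--     Returns
--     -------
--     int
--         New cell value (0 or 1).
--     """
--     index = (left << 2) | (center << 1) | right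
--     return (rule_number >> index) & 1
--
-- def generate_automaton(rule_number, width, steps):
--     """Generate a 2-D grid for an elementary cellular automaton.
--
--     Starts from a single 1 in the centre of the first row and applies
--     the rule for *steps* generations.
--
--     Parameters
--     ----------
--     rule_number : int
--         Rule number (0–255).
--     width : int
--         Number of cells per row.
--     steps : int
--         Number of generations (rows) to produce after the initial row.
--
--     Returns
--     -------
--     list[list[int]]
--         A grid of *steps* + 1 rows, each of length *width*, with values
--         0 or 1.
--     """
--     row = [0] * width
--     row[width // 2] = 1
--     grid = [row]
--     for _ in range(steps):
--         prev = grid[-1]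
--         new_row = [0] * width
--         for j in range(width):
--             left = prev[j - 1] if j > 0 else 0
--             center = prev[j]
--             right = prev[j + 1] if j < width - 1 else 0
--             new_row[j] = apply_rule(rule_number, left, center, right)
--         grid.append(new_row)
--     return grid
-- ===== SOURCE B (Python) =====
-- def generate_automaton(rule_number, width, steps):
--     """Bitmask re-implementation: each row is an integer, one step is
--     whole-row bitwise ops (OR of the neighbourhood-pattern masks whose
--     rule bit is set)."""
--     row = [0] * width
--     row[width // 2] = 1          # raises IndexError for width <= 0, like the list version
--     grid = [row]
--     mask = (1 << width) - 1
--     cur = 1 << (width // 2)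
--     for _ in range(steps):
--         left = (cur << 1) & mask     # bit j = previous cell j-1 (0 at the left edge)
--         right = cur >> 1             # bit j = previous cell j+1 (0 at the right edge)
--         nxt = 0
--         for p in range(8):
--             if (rule_number >> p) & 1:
--                 m = (left if p & 4 else left ^ mask) \
--                     & (cur if p & 2 else cur ^ mask) \
--                     & (right if p & 1 else right ^ mask)
--                 nxt |= m
--         cur = nxt & mask
--         grid.append([(cur >> j) & 1 for j in range(width)])
--     return grid
-- ===== Notes on version B (the rewrite author's own statement) =====
-- stated objective: alternative
-- what changed: B replaces A's per-cell inner loop (indexing the previous row with boundary conditionals and calling apply_rule on each three-cell neighbourhood) by an integer-bitmask representation of each row: one step is eight whole-row bitwise operations (OR of the neighbourhood-pattern masks whose rule bit is set, built from shifted/complemented copies of the row mask), decoded back to a 0/1 list per row.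
import Mathlib
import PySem

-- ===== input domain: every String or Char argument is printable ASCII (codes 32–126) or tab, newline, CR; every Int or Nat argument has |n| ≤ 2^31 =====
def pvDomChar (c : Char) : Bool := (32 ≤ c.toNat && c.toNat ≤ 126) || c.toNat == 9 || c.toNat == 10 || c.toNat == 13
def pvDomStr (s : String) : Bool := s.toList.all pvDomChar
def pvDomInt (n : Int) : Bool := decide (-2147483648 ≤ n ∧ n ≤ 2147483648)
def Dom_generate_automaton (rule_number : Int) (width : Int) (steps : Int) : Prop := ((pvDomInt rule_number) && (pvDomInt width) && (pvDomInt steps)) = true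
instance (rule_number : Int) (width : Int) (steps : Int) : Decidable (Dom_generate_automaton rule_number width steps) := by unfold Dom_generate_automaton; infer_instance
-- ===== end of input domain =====

-- B re-implements one automaton step as whole-row integer bitwise operations (an OR of the
-- eight neighbourhood-pattern masks whose rule bit is set) instead of A's per-cell neighbourhood
-- loop; same rows, same order (objective: alternative).


-- ===== PORT A =====
-- apply_rule: index = (left << 2) | (center << 1) | right is always in 0..7 here
-- (cells are 0/1), so '.toNat' on the shift amount is exact.
def pvApplyRule (rule_number : Int) (left : Int) (center : Int) (right : Int) : Int :=
  let index := PySem.Int.bor (PySem.Int.bor (left <<< (2 : Nat)) (center <<< (1 : Nat))) right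
  PySem.Int.band (rule_number >>> index.toNat) 1

def generate_automaton (rule_number : Int) (width : Int) (steps : Int) : List (List Int) :=
  let row := PySem.List.pyRepeat [(0 : Int)] width                      -- row = [0] * width
  let row := PySem.List.pySetD row (PySem.Int.floordiv width 2) 1       -- row[width // 2] = 1 (IndexError for width ≤ 0: excluded by Pre_)
  let grid := [row]
  (PySem.List.pyRange 0 steps 1).foldl (fun grid _ =>
    let prev := PySem.List.pyGetD grid (-1) []
    let new_row := (PySem.List.pyRange 0 width 1).foldl (fun new_row j =>     -- new_row = [0]*width; for j in range(width): new_row[j] = …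
      let left := if j > 0 then PySem.List.pyGetD prev (j - 1) 0 else 0
      let center := PySem.List.pyGetD prev j 0
      let right := if j < width - 1 then PySem.List.pyGetD prev (j + 1) 0 else 0
      PySem.List.pySetD new_row j (pvApplyRule rule_number left center right))
      (PySem.List.pyRepeat [(0 : Int)] width)
    grid ++ [new_row]) grid

-- ===== PORT B =====
-- Source B: decode of a row mask back to a 0/1 list: [(cur >> j) & 1 for j in range(width)]
def pvBitsToRow (width : Int) (cur : Int) : List Int :=
  (PySem.List.pyRange 0 width 1).map (fun j => PySem.Int.band (cur >>> j.toNat) 1)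

-- Source B: one step on the row mask; 'p' runs over 0..7 so 'p.toNat' is exact.
def pvStepMask (rule_number : Int) (mask : Int) (cur : Int) : Int :=
  let left := PySem.Int.band (cur <<< (1 : Nat)) mask
  let right := cur >>> (1 : Nat)
  let nxt := (PySem.List.pyRange 0 8 1).foldl (fun nxt p =>
    if PySem.Int.band (rule_number >>> p.toNat) 1 ≠ 0 then
      PySem.Int.bor nxt (PySem.Int.band (PySem.Int.band
        (if PySem.Int.band p 4 ≠ 0 then left else PySem.Int.bxor left mask)
        (if PySem.Int.band p 2 ≠ 0 then cur else PySem.Int.bxor cur mask))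
        (if PySem.Int.band p 1 ≠ 0 then right else PySem.Int.bxor right mask))
    else nxt) 0
  PySem.Int.band nxt mask

def generate_automaton_alt (rule_number : Int) (width : Int) (steps : Int) : List (List Int) :=
  let row := PySem.List.pyRepeat [(0 : Int)] width
  let row := PySem.List.pySetD row (PySem.Int.floordiv width 2) 1       -- raises for width ≤ 0, like A
  let mask : Int := (1 <<< width.toNat) - 1                             -- (1 << width) - 1; width ≥ 1 under Pre_, so '.toNat' is exact
  let cur : Int := 1 <<< (PySem.Int.floordiv width 2).toNat             -- 1 << (width // 2)
  ((PySem.List.pyRange 0 steps 1).foldl (fun st _ =>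
    let cur := pvStepMask rule_number mask st.2
    (st.1 ++ [pvBitsToRow width cur], cur)) ([row], cur)).1

-- ===== PRECONDITION & SPEC =====
-- Pre_ excludes exactly width ≤ 0, where the Python A (and B) raise IndexError on row[width // 2].
def Pre_generate_automaton (rule_number : Int) (width : Int) (steps : Int) : Prop := 1 ≤ width
instance (rule_number : Int) (width : Int) (steps : Int) : Decidable (Pre_generate_automaton rule_number width steps) := by unfold Pre_generate_automaton; infer_instance

def pvWitness_generate_automaton : Int × Int × Int := (30, 7, 4)

def Spec_generate_automaton (rule_number : Int) (width : Int) (steps : Int) (out : List (List Int)) : Prop := out = generate_automaton_alt rule_number width steps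
instance (rule_number : Int) (width : Int) (steps : Int) (out : List (List Int)) : Decidable (Spec_generate_automaton rule_number width steps out) := by unfold Spec_generate_automaton; infer_instance

-- ===== CLAIM (what is proved, stated in full; the proofs are below) =====
def Claim_equal_generate_automaton : Prop := ∀ (rule_number : Int) (width : Int) (steps : Int), Dom_generate_automaton rule_number width steps → Pre_generate_automaton rule_number width steps → Spec_generate_automaton rule_number width steps (generate_automaton rule_number width steps)

-- ===== LEMMAS AND PROOFS =====

-- The row encoded by the bitmask c : bit j (cell j) as a 0/1 integer.
def pvRowN (w : Nat) (c : Nat) : List Int :=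
  (List.range w).map (fun j => if c.testBit j then 1 else 0)

-- Nat-side mirror of pvStepMask's per-pattern mask.
def pvTermN (w : Nat) (c : Nat) (p : Nat) : Nat :=
  let mask := 2 ^ w - 1
  let L := (c <<< 1) &&& mask
  let R := c >>> 1
  ((if p &&& 4 ≠ 0 then L else L ^^^ mask) &&&
   (if p &&& 2 ≠ 0 then c else c ^^^ mask)) &&&
   (if p &&& 1 ≠ 0 then R else R ^^^ mask)

-- Nat-side mirror of pvStepMask.
def pvNxtN (rule : Int) (w : Nat) (c : Nat) : Nat :=
  ((List.range 8).foldl (fun (a : Nat) (p : Nat) =>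
    if PySem.Int.band (rule >>> p) 1 ≠ 0 then a ||| pvTermN w c p else a) 0) &&& (2 ^ w - 1)

-- iterated step on masks
def pvIterC (rule : Int) (w : Nat) (c0 : Nat) : Nat → Nat
  | 0 => c0
  | n + 1 => pvNxtN rule w (pvIterC rule w c0 n)

theorem pv_shift_and_one (c j : Nat) : (c >>> j) &&& 1 = if c.testBit j then 1 else 0 := by
  simp [Nat.testBit, Nat.and_one_is_mod, Nat.and_comm]
  split <;> omega

theorem pvNxtN_lt (rule : Int) (w c : Nat) : pvNxtN rule w c < 2 ^ w := by
  unfold pvNxtN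
  rw [Nat.and_two_pow_sub_one_eq_mod]
  exact Nat.mod_lt _ (Nat.two_pow_pos w)

theorem pvBitsToRow_eq (w : Nat) (c : Nat) :
    pvBitsToRow (w : Int) (c : Int) = pvRowN w c := by
  unfold pvBitsToRow pvRowN
  rw [PySem.List.pyRange_zero_nat, List.map_map]
  apply List.ext_getElem
  · simp
  · intro i h1 h2
    simp only [List.getElem_map, List.getElem_range, Function.comp_apply]
    rw [Int.toNat_natCast, Int.shiftRight_natCast_right, ← Int.natCast_shiftRight,
        show (1 : Int) = ((1 : Nat) : Int) from rfl, PySem.Int.band_natCast, pv_shift_and_one]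
    split <;> simp

theorem pvRow0_eq (w : Nat) :
    PySem.List.pySetD (List.replicate w (0 : Int)) ((w / 2 : Nat) : Int) 1
      = pvRowN w (2 ^ (w / 2)) := by
  rw [PySem.List.pySetD_natCast]
  unfold pvRowN
  apply List.ext_getElem
  · simp
  · intro i h1 h2
    simp only [List.getElem_set, List.getElem_replicate, List.getElem_map, List.getElem_range,
      Nat.testBit_two_pow]
    by_cases hh : w / 2 = i <;> simp [hh]

theorem pv_term_cast (rule : Int) (w c hd : Nat) :
    PySem.Int.band (PySem.Int.band
        (if PySem.Int.band ((hd : Nat) : Int) 4 ≠ 0 then PySem.Int.band ((c : Int) <<< (1 : Nat)) ((2 ^ w - 1 : Nat) : Int)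
         else PySem.Int.bxor (PySem.Int.band ((c : Int) <<< (1 : Nat)) ((2 ^ w - 1 : Nat) : Int)) ((2 ^ w - 1 : Nat) : Int))
        (if PySem.Int.band ((hd : Nat) : Int) 2 ≠ 0 then (c : Int) else PySem.Int.bxor (c : Int) ((2 ^ w - 1 : Nat) : Int)))
        (if PySem.Int.band ((hd : Nat) : Int) 1 ≠ 0 then (c : Int) >>> (1 : Nat)
         else PySem.Int.bxor ((c : Int) >>> (1 : Nat)) ((2 ^ w - 1 : Nat) : Int))
      = ((pvTermN w c hd : Nat) : Int) := by
  rw [show ((c : Int) <<< (1 : Nat)) = ((c <<< 1 : Nat) : Int) from (Int.natCast_shiftLeft ..).symm,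
      show ((c : Int) >>> (1 : Nat)) = ((c >>> 1 : Nat) : Int) from (Int.natCast_shiftRight ..).symm]
  simp only [pvTermN,
    show (4 : Int) = ((4 : Nat) : Int) from rfl,
    show (2 : Int) = ((2 : Nat) : Int) from rfl,
    show (1 : Int) = ((1 : Nat) : Int) from rfl,
    PySem.Int.band_natCast, PySem.Int.bxor_natCast, Ne, Nat.cast_eq_zero]
  split_ifs <;> simp only [PySem.Int.band_natCast]

theorem pv_fold_spec (rule : Int) (w c : Nat) (l : List Nat) : ∀ (a : Nat),
    (List.map (fun (k : Nat) => ((k : Nat) : Int)) l).foldl (fun nxt p =>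
      if PySem.Int.band (@HShiftRight.hShiftRight Int Nat Int Int.instHShiftRightNat rule p.toNat) 1 ≠ 0 then
        PySem.Int.bor nxt (PySem.Int.band (PySem.Int.band
          (if PySem.Int.band p 4 ≠ 0 then PySem.Int.band ((c : Int) <<< (1 : Nat)) ((2 ^ w - 1 : Nat) : Int)
           else PySem.Int.bxor (PySem.Int.band ((c : Int) <<< (1 : Nat)) ((2 ^ w - 1 : Nat) : Int)) ((2 ^ w - 1 : Nat) : Int))
          (if PySem.Int.band p 2 ≠ 0 then (c : Int) else PySem.Int.bxor (c : Int) ((2 ^ w - 1 : Nat) : Int)))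
          (if PySem.Int.band p 1 ≠ 0 then (c : Int) >>> (1 : Nat)
           else PySem.Int.bxor ((c : Int) >>> (1 : Nat)) ((2 ^ w - 1 : Nat) : Int)))
      else nxt) ((a : Nat) : Int)
    = ((l.foldl (fun (acc : Nat) (p : Nat) =>
        if PySem.Int.band (rule >>> p) 1 ≠ 0 then acc ||| pvTermN w c p else acc) a : Nat) : Int) := by
  induction l with
  | nil => intro a; rfl
  | cons hd tl ih =>
    intro a
    simp only [List.map_cons, List.foldl_cons, Int.toNat_natCast]
    split
    · rw [pv_term_cast rule w c hd, PySem.Int.bor_natCast]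
      exact ih _
    · exact ih _

theorem pvStepMask_eq (rule : Int) (w c : Nat) :
    pvStepMask rule ((2 ^ w - 1 : Nat) : Int) ((c : Nat) : Int) = ((pvNxtN rule w c : Nat) : Int) := by
  have h := pv_fold_spec rule w c (List.range 8) 0
  simp only [Nat.cast_zero] at h
  simp only [pvStepMask, pvNxtN, Int.shiftRight_natCast_right]
  rw [show (8 : Int) = ((8 : Nat) : Int) from rfl, PySem.List.pyRange_zero_nat, h,
    PySem.Int.band_natCast]

def pvIdx (l c r : Bool) : Nat :=
  (if l then 4 else 0) + (if c then 2 else 0) + (if r then 1 else 0)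

theorem pv_testBit_fold (rule : Int) (w c : Nat) (l : List Nat) (j : Nat) : ∀ a : Nat,
    ((l.foldl (fun (acc : Nat) (p : Nat) =>
        if PySem.Int.band (rule >>> p) 1 ≠ 0 then acc ||| pvTermN w c p else acc) a).testBit j)
      = (a.testBit j || l.any (fun p =>
          decide (PySem.Int.band (rule >>> p) 1 ≠ 0) && (pvTermN w c p).testBit j)) := by
  induction l with
  | nil => intro a; simp
  | cons hd tl ih =>
    intro a
    simp only [List.foldl_cons, List.any_cons]
    rw [ih]
    split
    · rename_i h
      simp [Nat.testBit_lor, h, Bool.or_assoc]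
    · rename_i h
      simp [h]

theorem pv_factor_tb (w j : Nat) (hj : j < w) (P : Prop) [Decidable P] (X : Nat) :
    (if P then X else X ^^^ (2 ^ w - 1)).testBit j = (decide P == X.testBit j) := by
  split <;> rename_i h <;>
    simp [Nat.testBit_xor, Nat.testBit_two_pow_sub_one, hj, h]

theorem pv_termN_testBit (w c j p : Nat) (hj : j < w) :
    (pvTermN w c p).testBit j =
      ((decide (p &&& 4 ≠ 0) == ((c <<< 1) &&& (2 ^ w - 1)).testBit j) &&
       (decide (p &&& 2 ≠ 0) == c.testBit j) &&
       (decide (p &&& 1 ≠ 0) == (c >>> 1).testBit j)) := by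
  simp only [pvTermN]
  rw [Nat.testBit_land, Nat.testBit_land, pv_factor_tb w j hj, pv_factor_tb w j hj,
    pv_factor_tb w j hj, Bool.and_assoc]

theorem pv_tb_L (w c j : Nat) (hj : j < w) :
    (((c <<< 1) &&& (2 ^ w - 1)).testBit j) = (decide (0 < j) && c.testBit (j - 1)) := by
  rw [Nat.testBit_land, Nat.testBit_shiftLeft, Nat.testBit_two_pow_sub_one]
  simp [hj, Nat.lt_iff_add_one_le]

theorem pv_testBit_nxt (rule : Int) (w c j : Nat) (hj : j < w) :
    (pvNxtN rule w c).testBit j =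
      decide (PySem.Int.band (rule >>> pvIdx (decide (0 < j) && c.testBit (j - 1))
        (c.testBit j) (c.testBit (j + 1))) 1 ≠ 0) := by
  unfold pvNxtN
  rw [Nat.testBit_land, Nat.testBit_two_pow_sub_one, pv_testBit_fold]
  simp only [Nat.zero_testBit, Bool.false_or, hj, decide_true, Bool.and_true]
  rw [show List.range 8 = [0, 1, 2, 3, 4, 5, 6, 7] from rfl]
  simp only [List.any_cons, List.any_nil, Bool.or_false]
  simp only [pv_termN_testBit w c j _ hj, pv_tb_L w c j hj, Nat.testBit_shiftRight]
  rw [show 1 + j = j + 1 from Nat.add_comm 1 j]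
  cases hl : (decide (0 < j) && c.testBit (j - 1)) <;>
    cases hc2 : c.testBit j <;>
      cases hr : c.testBit (j + 1) <;>
        simp [pvIdx]

theorem pvApplyRule_eq (rule : Int) (l c r : Bool) :
    pvApplyRule rule (if l then 1 else 0) (if c then 1 else 0) (if r then 1 else 0)
      = PySem.Int.band (rule >>> pvIdx l c r) 1 := by
  cases l <;> cases c <;> cases r <;> rfl

theorem pv_band_one_val (x : Int) : PySem.Int.band x 1 = if PySem.Int.band x 1 ≠ 0 then 1 else 0 := by
  rw [PySem.Int.band_one]
  have h1 := PySem.Int.mod_nonneg x (by norm_num : (0:Int) < 2)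
  have h2 := PySem.Int.mod_lt x (by norm_num : (0:Int) < 2)
  split <;> omega

theorem pvRowN_getD (w c k : Nat) :
    (pvRowN w c).getD k 0 = if k < w then (if c.testBit k then 1 else 0) else 0 := by
  unfold pvRowN
  by_cases hk : k < w <;>
    simp [List.getD_eq_getElem?_getD, List.getElem?_map, List.getElem?_range, hk]

theorem pv_fill (g : Int → Int) (w : Nat) : ∀ (n : Nat), n ≤ w →
    (PySem.List.pyRange 0 (n : Int) 1).foldl (fun nr j => PySem.List.pySetD nr j (g j))
        (List.replicate w (0 : Int))
      = (List.range n).map (fun (j : Nat) => g ((j : Nat) : Int)) ++ List.replicate (w - n) 0 := by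
  intro n
  induction n with
  | zero => intro _; simp [PySem.List.pyRange_one_eq_nil]
  | succ n ih =>
    intro hn
    rw [show ((n + 1 : Nat) : Int) = (n : Int) + 1 by push_cast; ring,
      PySem.List.pyRange_one_succ_right (by positivity), List.foldl_append, ih (by omega)]
    simp only [List.foldl_cons, List.foldl_nil, PySem.List.pySetD_natCast]
    rw [List.set_append_right _ _ (by simp), List.range_succ, List.map_append]
    simp only [List.length_map, List.length_range, Nat.sub_self]
    rw [show w - n = (w - (n + 1)) + 1 by omega, List.replicate_succ, List.set_cons_zero,
      List.append_assoc]
    rfl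

theorem pvStepRow_eq (rule : Int) (w : Nat) (hw : 1 ≤ w) (c : Nat) (hc : c < 2 ^ w) :
    (PySem.List.pyRange 0 (w : Int) 1).foldl (fun new_row j =>
      PySem.List.pySetD new_row j (pvApplyRule rule
        (if j > 0 then PySem.List.pyGetD (pvRowN w c) (j - 1) 0 else 0)
        (PySem.List.pyGetD (pvRowN w c) j 0)
        (if j < (w : Int) - 1 then PySem.List.pyGetD (pvRowN w c) (j + 1) 0 else 0)))
      (List.replicate w (0 : Int))
      = pvRowN w (pvNxtN rule w c) := by
  have h := pv_fill (fun j =>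
    pvApplyRule rule
      (if j > 0 then PySem.List.pyGetD (pvRowN w c) (j - 1) 0 else 0)
      (PySem.List.pyGetD (pvRowN w c) j 0)
      (if j < (w : Int) - 1 then PySem.List.pyGetD (pvRowN w c) (j + 1) 0 else 0)) w w le_rfl
  rw [Nat.sub_self, List.replicate_zero, List.append_nil] at h
  refine Eq.trans h ?_
  show _ = (List.range w).map (fun j => if (pvNxtN rule w c).testBit j then (1 : Int) else 0)
  refine List.map_congr_left (fun j hj => ?_)
  rw [List.mem_range] at hj
  simp only []
  have hleft : (if (j : Int) > 0 then PySem.List.pyGetD (pvRowN w c) ((j : Int) - 1) 0 else 0)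
      = if (decide (0 < j) && c.testBit (j - 1)) then (1 : Int) else 0 := by
    by_cases h0 : 0 < j
    · rw [if_pos (by exact_mod_cast h0), show ((j : Int) - 1) = ((j - 1 : Nat) : Int) by omega,
        PySem.List.pyGetD_natCast, pvRowN_getD, if_pos (by omega)]
      simp [h0]
    · rw [if_neg (by omega)]
      simp [h0]
  have hcent : PySem.List.pyGetD (pvRowN w c) (j : Int) 0
      = if c.testBit j then (1 : Int) else 0 := by
    rw [PySem.List.pyGetD_natCast, pvRowN_getD, if_pos hj]
  have hright : (if (j : Int) < (w : Int) - 1 then PySem.List.pyGetD (pvRowN w c) ((j : Int) + 1) 0 else 0)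
      = if c.testBit (j + 1) then (1 : Int) else 0 := by
    by_cases h1 : j + 1 < w
    · rw [if_pos (by omega), show ((j : Int) + 1) = ((j + 1 : Nat) : Int) by omega,
        PySem.List.pyGetD_natCast, pvRowN_getD, if_pos h1]
    · rw [if_neg (by omega),
        Nat.testBit_eq_false_of_lt (Nat.lt_of_lt_of_le hc (Nat.pow_le_pow_right (by norm_num) (by omega)))]
      simp
  rw [hleft, hcent, hright, pvApplyRule_eq, pv_band_one_val, pv_testBit_nxt rule w c j hj]
  split <;> simp_all

theorem pv_iter (rule : Int) (w : Nat) (hw : 1 ≤ w) : ∀ (n : Nat),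
    (PySem.List.pyRange 0 (n : Int) 1).foldl (fun st (_ : Int) =>
        (st.1 ++ [pvBitsToRow (w : Int) (pvStepMask rule ((2 ^ w - 1 : Nat) : Int) st.2)],
          pvStepMask rule ((2 ^ w - 1 : Nat) : Int) st.2))
        ([pvRowN w (2 ^ (w / 2))], ((2 ^ (w / 2) : Nat) : Int))
      = ((PySem.List.pyRange 0 (n : Int) 1).foldl (fun grid (_ : Int) =>
          grid ++ [(PySem.List.pyRange 0 (w : Int) 1).foldl (fun new_row j =>
            PySem.List.pySetD new_row j (pvApplyRule rule
              (if j > 0 then PySem.List.pyGetD (PySem.List.pyGetD grid (-1) []) (j - 1) 0 else 0)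
              (PySem.List.pyGetD (PySem.List.pyGetD grid (-1) []) j 0)
              (if j < (w : Int) - 1 then PySem.List.pyGetD (PySem.List.pyGetD grid (-1) []) (j + 1) 0 else 0)))
            (List.replicate w (0 : Int))])
          [pvRowN w (2 ^ (w / 2))],
        ((pvIterC rule w (2 ^ (w / 2)) n : Nat) : Int))
    ∧ PySem.List.pyGetD ((PySem.List.pyRange 0 (n : Int) 1).foldl (fun grid (_ : Int) =>
          grid ++ [(PySem.List.pyRange 0 (w : Int) 1).foldl (fun new_row j =>
            PySem.List.pySetD new_row j (pvApplyRule rule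
              (if j > 0 then PySem.List.pyGetD (PySem.List.pyGetD grid (-1) []) (j - 1) 0 else 0)
              (PySem.List.pyGetD (PySem.List.pyGetD grid (-1) []) j 0)
              (if j < (w : Int) - 1 then PySem.List.pyGetD (PySem.List.pyGetD grid (-1) []) (j + 1) 0 else 0)))
            (List.replicate w (0 : Int))])
          [pvRowN w (2 ^ (w / 2))]) (-1) []
        = pvRowN w (pvIterC rule w (2 ^ (w / 2)) n)
    ∧ pvIterC rule w (2 ^ (w / 2)) n < 2 ^ w := by
  intro n
  induction n with
  | zero =>
    refine ⟨by simp [PySem.List.pyRange_one_eq_nil, pvIterC], ?_, ?_⟩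
    · simp only [Nat.cast_zero, PySem.List.pyRange_one_eq_nil (by omega : (0:Int) ≤ 0),
        List.foldl_nil]
      exact PySem.List.pyGetD_neg_one_append_singleton [] _ []
    · exact Nat.pow_lt_pow_right (by norm_num) (by omega)
  | succ n ih =>
    obtain ⟨ih1, ih2, ih3⟩ := ih
    rw [show ((n + 1 : Nat) : Int) = (n : Int) + 1 by push_cast; ring,
      PySem.List.pyRange_one_succ_right (by positivity)]
    simp only [List.foldl_append, List.foldl_cons, List.foldl_nil]
    rw [ih1, ih2]
    refine ⟨?_, ?_, pvNxtN_lt rule w _⟩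
    · simp only [pvStepMask_eq rule w _, pvBitsToRow_eq, pvStepRow_eq rule w hw _ ih3]
      rfl
    · rw [pvStepRow_eq rule w hw _ ih3]
      exact PySem.List.pyGetD_neg_one_append_singleton _ _ []

theorem generate_automaton_spec : Claim_equal_generate_automaton := by
  intro rule width steps _ hpre
  unfold Pre_generate_automaton at hpre
  unfold Spec_generate_automaton
  obtain ⟨w, rfl⟩ : ∃ w : Nat, ((w : Nat) : Int) = width :=
    ⟨width.toNat, Int.toNat_of_nonneg (by omega)⟩
  have hw : 1 ≤ w := by exact_mod_cast hpre
  have hst : PySem.List.pyRange 0 steps 1 = PySem.List.pyRange 0 ((steps.toNat : Nat) : Int) 1 := by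
    by_cases h : 0 ≤ steps
    · rw [Int.toNat_of_nonneg h]
    · rw [PySem.List.pyRange_one_eq_nil (by omega), PySem.List.pyRange_one_eq_nil (by omega)]
  unfold generate_automaton generate_automaton_alt
  simp only [hst, PySem.List.pyRepeat_singleton, show (2 : Int) = ((2 : Nat) : Int) from rfl,
    PySem.Int.floordiv_natCast, Int.toNat_natCast, Nat.one_shiftLeft, pvRow0_eq w,
    show ((2 ^ w : Nat) : Int) - 1 = ((2 ^ w - 1 : Nat) : Int) from by
      push_cast [Nat.one_le_two_pow]; ring]
  rw [(pv_iter rule w hw steps.toNat).1]
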